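-- pv_equiv track=rewrite | github.com/l4rzy/euler | 5/solve.py | check
-- ===== SOURCE A (Python) =====
-- def check(cf, df):
--     mcf = {i: cf.count(i) for i in cf}
--     mdf = {i: df.count(i) for i in df}
--     r = {}
--     for k in mdf:
--         if k not in mcf:
--             r[k] = mdf[k]
--         else:
--             if mcf[k] < mdf[k]:
--                 r[k] = mdf[k] - mcf[k]
--     return r
-- ===== SOURCE B (Python) =====
-- def check(cf, df):
--     # Multiset cancellation: walk df from the back, cancelling each element
--     # against one matching occurrence still available in a pool of cf;
--     # the uncancelled df elements (collected back-to-front) are then tallied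
--     # front-to-back, which reproduces A's key order (first occurrence in df).
--     pool = list(cf)
--     rest = []
--     for x in reversed(df):
--         if x in pool:
--             pool.remove(x)
--         else:
--             rest.append(x)
--     r = {}
--     for x in reversed(rest):
--         r[x] = r.get(x, 0) + 1
--     return r
-- ===== Notes on version B (the rewrite author's own statement) =====
-- stated objective: alternative
-- what changed: Replaces A's two frequency maps and per-key comparison loop with a multiset-cancellation pass: each df element (scanned from the back) cancels one available cf occurrence from a pool, and the uncancelled leftovers are tallied, so no counts are ever compared.
import Mathlib
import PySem

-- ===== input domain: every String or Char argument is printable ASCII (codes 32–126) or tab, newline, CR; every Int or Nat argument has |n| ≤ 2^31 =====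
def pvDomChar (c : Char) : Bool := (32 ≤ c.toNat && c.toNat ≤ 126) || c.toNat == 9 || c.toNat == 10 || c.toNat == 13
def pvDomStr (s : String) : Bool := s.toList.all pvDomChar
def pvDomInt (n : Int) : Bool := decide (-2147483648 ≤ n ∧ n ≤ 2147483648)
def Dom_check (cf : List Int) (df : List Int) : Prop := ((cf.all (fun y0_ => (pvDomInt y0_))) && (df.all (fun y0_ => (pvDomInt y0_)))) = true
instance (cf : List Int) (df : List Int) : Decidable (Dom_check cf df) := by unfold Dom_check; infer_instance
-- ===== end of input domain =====

-- B replaces A's two frequency maps and per-key count comparisons by a multiset-cancellation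
-- pass (each df element cancels one available cf occurrence; leftovers are tallied): alternative.

-- ===== PORT A =====
-- mcf = {i: cf.count(i) for i in cf};  mdf = {i: df.count(i) for i in df};
-- r built by iterating mdf's keys with the not-in / less-than branches; returned as items.
def check (cf : List Int) (df : List Int) : List (Int × Int) :=
  let mcf : PySem.Dict Int Int := cf.foldl (fun d i => d.insert i (cf.count i : Int)) PySem.Dict.empty
  let mdf : PySem.Dict Int Int := df.foldl (fun d i => d.insert i (df.count i : Int)) PySem.Dict.empty
  let r : PySem.Dict Int Int :=
    (mdf.keys).foldl (fun r k =>
      if ¬ mcf.contains k then r.insert k (mdf.getD k 0)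
      else if mcf.getD k 0 < mdf.getD k 0 then r.insert k (mdf.getD k 0 - mcf.getD k 0)
      else r) PySem.Dict.empty
  r.items

-- ===== PORT B =====
-- pool = list(cf); for x in reversed(df): cancel x from pool or append to rest;
-- then count reversed(rest) into r with get(x,0)+1; returned as items.
def check_alt (cf : List Int) (df : List Int) : List (Int × Int) :=
  let st : List Int × List Int :=
    (df.reverse).foldl (fun st x =>
      if x ∈ st.1 then ((PySem.List.remove? st.1 x).getD st.1, st.2)
      else (st.1, st.2 ++ [x])) (cf, [])
  let r : PySem.Dict Int Int :=
    (st.2.reverse).foldl (fun d x => d.insert x (d.getD x 0 + 1)) PySem.Dict.empty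
  r.items

-- ===== PRECONDITION & SPEC =====
def Spec_check (cf : List Int) (df : List Int) (out : List (Int × Int)) : Prop := out = check_alt cf df
instance (cf : List Int) (df : List Int) (out : List (Int × Int)) : Decidable (Spec_check cf df out) := by unfold Spec_check; infer_instance

-- ===== CLAIM (what is proved, stated in full; the proofs are below) =====
def Claim_equal_check : Prop := ∀ (cf : List Int) (df : List Int), Dom_check cf df → Spec_check cf df (check cf df)

-- ===== LEMMAS AND PROOFS =====

-- the survivors of B's cancellation pass, in df order: df[i] survives iff the
-- suffix of df starting at df[i] holds more copies of df[i] than cf does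
def surv (cf : List Int) : List Int → List Int
  | [] => []
  | x :: t => if cf.count x < (x :: t).count x then x :: surv cf t else surv cf t

-- the comprehension dict {i: f(i) for i in l}: lookup is f on members, default elsewhere
theorem getD_foldl_insert_keyfn (l : List Int) (f : Int → Int) (d : PySem.Dict Int Int) (k : Int) :
    (l.foldl (fun d i => d.insert i (f i)) d).getD k 0
      = if k ∈ l then f k else d.getD k 0 := by
  induction l generalizing d with
  | nil => simp
  | cons x xs ih =>
      simp only [List.foldl_cons, ih, PySem.Dict.getD_insert, List.mem_cons]
      by_cases hx : k = x <;> by_cases hxs : k ∈ xs <;> simp [hx, hxs]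

-- B's loop body (proof-side name for the fold step of the cancellation pass)
def pvStep (x : Int) (st : List Int × List Int) : List Int × List Int :=
  if x ∈ st.1 then ((PySem.List.remove? st.1 x).getD st.1, st.2) else (st.1, st.2 ++ [x])

-- invariant of B's cancellation fold: the pool holds the uncancelled cf counts,
-- and rest is the reversed survivor list
theorem cancel_fold_spec (cf : List Int) (df : List Int) :
    (df.foldr pvStep ((cf, []) : List Int × List Int)).2 = (surv cf df).reverse
    ∧ ∀ k, (df.foldr pvStep ((cf, []) : List Int × List Int)).1.count k
      = cf.count k - df.count k := by
  induction df with
  | nil => simp [surv]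
  | cons x t ih =>
      simp only [List.foldr_cons]
      set st := t.foldr pvStep ((cf, []) : List Int × List Int) with hst
      obtain ⟨ih2, ih1⟩ := ih
      by_cases hx : x ∈ st.1
      · -- x cancels: pool loses one x, rest unchanged; x does not survive
        have hc : 0 < cf.count x - t.count x := by
          have h1 := ih1 x
          have h2 := List.count_pos_iff.2 hx
          omega
        have hrem : PySem.List.remove? st.1 x = some (st.1.erase x) :=
          PySem.List.remove?_eq_some_erase st.1 x hx
        have hstep : pvStep x st = (st.1.erase x, st.2) := by
          simp [pvStep, hx, hrem]
        have hns : ¬ cf.count x < (x :: t).count x := by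
          simp only [List.count_cons_self]; omega
        refine ⟨by rw [hstep, ih2, surv, if_neg hns], ?_⟩
        intro k
        rw [hstep]
        simp only [List.count_erase]
        have h1 := ih1 k
        by_cases hkx : x = k
        · subst hkx
          simp only [beq_self_eq_true, if_pos, List.count_cons_self]
          omega
        · have h2 : (x :: t).count k = t.count k := by
            simp [hkx]
          simp only [beq_iff_eq, hkx, if_neg, not_false_iff]
          omega
      · -- x survives: pool unchanged, rest gains x
        have hc : cf.count x - t.count x = 0 := by
          have h1 := ih1 x
          have h2 := List.count_eq_zero_of_not_mem hx
          omega
        have hstep : pvStep x st = (st.1, st.2 ++ [x]) := by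
          simp [pvStep, hx]
        have hs : cf.count x < (x :: t).count x := by
          simp only [List.count_cons_self]; omega
        refine ⟨by rw [hstep]; simp only [surv, if_pos hs, List.reverse_cons, ih2], ?_⟩
        intro k
        rw [hstep]
        dsimp only
        have h1 := ih1 k
        by_cases hkx : x = k
        · subst hkx
          simp only [List.count_cons_self]
          omega
        · have h2 : (x :: t).count k = t.count k := by
            simp [hkx]
          omega

theorem count_surv (cf : List Int) (df : List Int) (k : Int) :
    (surv cf df).count k = df.count k - cf.count k := by
  induction df with
  | nil => simp [surv]
  | cons x t ih =>
      rw [surv]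
      by_cases hs : cf.count x < (x :: t).count x
      · rw [if_pos hs]
        simp only [List.count_cons_self] at hs
        by_cases hkx : k = x
        · subst hkx
          simp only [List.count_cons_self, ih]
          omega
        · have hkx' : ¬ x = k := fun h => hkx h.symm
          have h2 : (x :: t).count k = t.count k := by simp [hkx']
          have h3 : (x :: surv cf t).count k = (surv cf t).count k := by simp [hkx']
          rw [h2, h3, ih]
      · rw [if_neg hs]
        simp only [List.count_cons_self] at hs
        by_cases hkx : k = x
        · subst hkx
          simp only [List.count_cons_self, ih]
          omega
        · have hkx' : ¬ x = k := fun h => hkx h.symm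
          have h2 : (x :: t).count k = t.count k := by simp [hkx']
          rw [h2, ih]

-- folding Set.add over t onto any accumulator s appends exactly the new distinct elements
theorem foldl_set_add_eq (t : List Int) : ∀ s : List Int,
    t.foldl PySem.Set.add s
      = s ++ (t.foldl PySem.Set.add []).filter (fun z => decide (z ∉ s)) := by
  induction t with
  | nil => simp
  | cons y t ih =>
      intro s
      simp only [List.foldl_cons]
      rw [ih (PySem.Set.add s y), ih (PySem.Set.add [] y)]
      have hnil : PySem.Set.add ([] : List Int) y = [y] := by
        simp [PySem.Set.add]
      rw [hnil]
      by_cases hy : y ∈ s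
      · have hadd : PySem.Set.add s y = s := by
          simp [PySem.Set.add, PySem.Set.contains, hy]
        rw [hadd, List.filter_append]
        have h1 : ([y] : List Int).filter (fun z => decide (z ∉ s)) = [] := by
          simp [hy]
        rw [h1, List.nil_append, List.filter_filter]
        refine congrArg (s ++ ·) (List.filter_congr ?_)
        intro z _
        by_cases hz : z ∈ s
        · simp [hz]
        · have : z ≠ y := fun h => hz (h ▸ hy)
          simp [hz, this]
      · have hadd : PySem.Set.add s y = s ++ [y] := by
          simp [PySem.Set.add, PySem.Set.contains, hy]
        rw [hadd, List.filter_append]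
        have h1 : ([y] : List Int).filter (fun z => decide (z ∉ s)) = [y] := by
          simp [hy]
        rw [h1, List.append_assoc, List.filter_filter]
        refine congrArg (s ++ ·) (congrArg (y :: ·) (List.filter_congr ?_))
        intro z _
        by_cases hzy : z = y
        · simp [hzy]
        · by_cases hz : z ∈ s <;> simp [hz, hzy]

-- first occurrences: set(x :: t) = x followed by set(t) without x
theorem ofList_cons_filter (x : Int) (t : List Int) :
    PySem.Set.ofList (x :: t) = x :: (PySem.Set.ofList t).filter (fun y => decide (y ≠ x)) := by
  rw [PySem.Set.ofList_eq_foldl, PySem.Set.ofList_eq_foldl]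
  simp only [List.foldl_cons]
  have hnil : PySem.Set.add ([] : List Int) x = [x] := by
    simp [PySem.Set.add]
  rw [hnil, foldl_set_add_eq t [x]]
  refine congrArg (x :: ·) (List.filter_congr ?_)
  intro z _
  simp

-- key order: the distinct survivors are exactly the distinct df elements with a
-- positive residual, in first-occurrence order
theorem ofList_surv (cf : List Int) (df : List Int) :
    PySem.Set.ofList (surv cf df)
      = (PySem.Set.ofList df).filter (fun k => decide (cf.count k < df.count k)) := by
  induction df with
  | nil => simp [surv]
  | cons x t ih =>
      rw [surv, ofList_cons_filter]
      by_cases hs : cf.count x < (x :: t).count x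
      · rw [if_pos hs, ofList_cons_filter, List.filter_cons_of_pos (by simpa using hs),
            ih, List.filter_filter, List.filter_filter]
        refine congrArg (x :: ·) (List.filter_congr ?_)
        intro k _
        by_cases hkx : k = x
        · simp [hkx]
        · have hxk : ¬ x = k := fun h => hkx h.symm
          have h2 : (x :: t).count k = t.count k := by simp [hxk]
          simp [hkx, h2, Bool.and_comm]
      · rw [if_neg hs, List.filter_cons_of_neg (by simpa using hs), ih, List.filter_filter]
        refine List.filter_congr ?_
        intro k _
        by_cases hkx : k = x
        · subst hkx
          simp only [List.count_cons_self] at hs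
          have : ¬ cf.count k < t.count k := by omega
          simp [this]
        · have hxk : ¬ x = k := fun h => hkx h.symm
          have h2 : (x :: t).count k = t.count k := by simp [hxk]
          simp [hkx, h2]

-- a fold of fresh-key inserts over a duplicate-free list lists its pairs in order
theorem items_insert_fold (l : List Int) (f : Int → Int) (hnd : l.Nodup) :
    (l.foldl (fun r k => r.insert k (f k)) (PySem.Dict.empty : PySem.Dict Int Int)).items
      = l.map (fun k => (k, f k)) := by
  have h := PySem.Dict.items_foldl_insert_fresh (l := l) (k := fun x => x) (v := f)
      (d := (PySem.Dict.empty : PySem.Dict Int Int))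
      (by intro a _; exact PySem.Dict.contains_empty a) (by simpa using hnd)
  simpa using h

-- the comprehension dict's contains agrees with list membership
theorem contains_countdict (l : List Int) (k : Int) :
    ((l.foldl (fun d i => d.insert i (l.count i : Int)) PySem.Dict.empty).contains k)
      = decide (k ∈ l) := by
  rw [PySem.Dict.contains_eq_decide_mem_keys, PySem.Dict.keys_foldl_insert]
  have h : PySem.Set.update (PySem.Dict.empty : PySem.Dict Int Int).keys l
      = PySem.Set.ofList l := by
    simp [PySem.Dict.keys_empty, PySem.Set.update, PySem.Set.ofList_eq_foldl]
  rw [h]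
  simp [PySem.Set.mem_ofList]

theorem check_spec_aux : ∀ (cf df : List Int), check cf df = check_alt cf df := by
  intro cf df
  unfold check check_alt
  dsimp only
  -- B side: the cancellation fold is the foldr of pvStep, its rest is the survivor list
  have hfold : (df.reverse).foldl (fun st x =>
      if x ∈ st.1 then ((PySem.List.remove? st.1 x).getD st.1, st.2)
      else (st.1, st.2 ++ [x])) ((cf, []) : List Int × List Int)
      = df.foldr pvStep ((cf, []) : List Int × List Int) := by
    rw [List.foldl_reverse]
    rfl
  rw [hfold, (cancel_fold_spec cf df).1, List.reverse_reverse,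
      PySem.Dict.foldl_insert_getD_add_one_eq_counter, PySem.Dict.items_counter]
  -- A side: keys of mdf are the distinct df elements
  have hkeys : (df.foldl (fun d i => d.insert i (df.count i : Int)) PySem.Dict.empty).keys
      = PySem.Set.ofList df := by
    rw [PySem.Dict.keys_foldl_insert]
    simp [PySem.Set.update, PySem.Set.ofList_eq_foldl]
  rw [hkeys]
  -- unify A's branches into a single count comparison on members of set(df)
  have hcongr : (PySem.Set.ofList df).foldl (fun r k =>
      if ¬ (cf.foldl (fun d i => d.insert i (cf.count i : Int)) PySem.Dict.empty).contains k
      then r.insert k ((df.foldl (fun d i => d.insert i (df.count i : Int)) PySem.Dict.empty).getD k 0)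
      else if (cf.foldl (fun d i => d.insert i (cf.count i : Int)) PySem.Dict.empty).getD k 0
              < (df.foldl (fun d i => d.insert i (df.count i : Int)) PySem.Dict.empty).getD k 0
        then r.insert k ((df.foldl (fun d i => d.insert i (df.count i : Int)) PySem.Dict.empty).getD k 0
              - (cf.foldl (fun d i => d.insert i (cf.count i : Int)) PySem.Dict.empty).getD k 0)
        else r) PySem.Dict.empty
      = (PySem.Set.ofList df).foldl (fun r k =>
          if (cf.count k : Int) < (df.count k : Int)
          then r.insert k ((df.count k : Int) - (cf.count k : Int)) else r) PySem.Dict.empty := by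
    refine PySem.List.foldl_congr_mem _ _ _ _ ?_
    intro r k hk
    have hkdf : k ∈ df := (PySem.Set.mem_ofList df k).1 hk
    rw [contains_countdict, getD_foldl_insert_keyfn, getD_foldl_insert_keyfn]
    by_cases hkc : k ∈ cf
    · simp [hkc, hkdf]
    · have h0 : (cf.count k : Int) = 0 := by
        simp [List.count_eq_zero_of_not_mem hkc]
      simp [hkc, hkdf, h0, List.count_pos_iff]
  rw [hcongr, PySem.List.foldl_ite_eq_foldl_filter]
  rw [items_insert_fold _ (fun k => (df.count k : Int) - (cf.count k : Int))
        ((PySem.Set.nodup_ofList df).filter _)]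
  rw [ofList_surv]
  have hpred : (PySem.Set.ofList df).filter (fun k => decide (cf.count k < df.count k))
      = (PySem.Set.ofList df).filter (fun k => decide ((cf.count k : Int) < (df.count k : Int))) := by
    refine List.filter_congr ?_
    intro k _
    simp
  rw [hpred]
  refine List.map_congr_left ?_
  intro k hk
  have hlt : (cf.count k : Int) < (df.count k : Int) := by
    have := (List.mem_filter.1 hk).2
    simpa using this
  have hle : cf.count k ≤ df.count k := by exact_mod_cast Int.le_of_lt hlt
  rw [count_surv]
  congr 1
  omega

-- ===== VERDICT (by name: the statement is the Claim_ definition above) =====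
theorem check_spec : Claim_equal_check := by
  intro cf df _
  exact check_spec_aux cf df
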